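-- pv_equiv track=rewrite | github.com/wilatdragon/best-regard-challenge-2026 | scoring.py | rank_wildcard
-- ===== SOURCE A (Python) =====
-- PLAYERS = ["Arnav", "Sibi", "Nikhil"]
--
-- def rank_wildcard(counts: dict) -> dict:
--     """
--     Given {player: count}, return {player: "first"/"second"/"third"/tied_*}.
--     Tie rules:
--       - 2-way tie for 1st  → both "tied_first" (+4), 3rd gets "third" (0)
--       - 2-way tie for last → "tied_second" (+2 each), 1st keeps "first" (+5)
--       - 3-way tie          → all "tied_first" (+4)
--     """
--     sorted_players = sorted(PLAYERS, key=lambda p: counts.get(p, 0), reverse=True)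
--     vals = [counts.get(p, 0) for p in sorted_players]
--
--     # 3-way tie
--     if vals[0] == vals[1] == vals[2]:
--         return {p: "tied_first" for p in PLAYERS}
--
--     # 2-way tie for 1st
--     if vals[0] == vals[1] and vals[1] != vals[2]:
--         rankings = {}
--         for p in sorted_players[:2]:
--             rankings[p] = "tied_first"
--         rankings[sorted_players[2]] = "third"
--         return rankings
--
--     # 2-way tie for last
--     if vals[1] == vals[2] and vals[0] != vals[1]:
--         rankings = {sorted_players[0]: "first"}
--         for p in sorted_players[1:]:
--             rankings[p] = "tied_second"
--         return rankings
--
--     # No ties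
--     return {
--         sorted_players[0]: "first",
--         sorted_players[1]: "second",
--         sorted_players[2]: "third",
--     }
-- ===== SOURCE B (Python) =====
-- PLAYERS = ["Arnav", "Sibi", "Nikhil"]
--
-- def _label(g, t):
--     if g == 0:
--         return "tied_first" if t >= 2 else "first"
--     if g == 1:
--         return "tied_second" if t == 2 else "second"
--     return "third"
--
-- def rank_wildcard(counts: dict) -> dict:
--     # Bucket dispatch: a player's label is determined by how many players beat
--     # him (g) and how many share his count (t); emitting buckets g=0,1,2 in
--     # PLAYERS order reproduces the stable descending order of the ranking.
--     val = {p: counts.get(p, 0) for p in PLAYERS}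
--     out = {}
--     for g in range(3):
--         for p in PLAYERS:
--             above = sum(1 for q in PLAYERS if val[q] > val[p])
--             if above == g:
--                 tied = sum(1 for q in PLAYERS if val[q] == val[p])
--                 out[p] = _label(g, tied)
--     return out
-- ===== Notes on version B (the rewrite author's own statement) =====
-- stated objective: alternative
-- what changed: Instead of sorting the players and branching on adjacent equalities of the sorted values, B computes for each player the pair (number of players with a strictly higher count, number of players tied with him) and emits the players bucket by bucket (0, 1, 2 players above), deriving each label directly from that pair.
import Mathlib
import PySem

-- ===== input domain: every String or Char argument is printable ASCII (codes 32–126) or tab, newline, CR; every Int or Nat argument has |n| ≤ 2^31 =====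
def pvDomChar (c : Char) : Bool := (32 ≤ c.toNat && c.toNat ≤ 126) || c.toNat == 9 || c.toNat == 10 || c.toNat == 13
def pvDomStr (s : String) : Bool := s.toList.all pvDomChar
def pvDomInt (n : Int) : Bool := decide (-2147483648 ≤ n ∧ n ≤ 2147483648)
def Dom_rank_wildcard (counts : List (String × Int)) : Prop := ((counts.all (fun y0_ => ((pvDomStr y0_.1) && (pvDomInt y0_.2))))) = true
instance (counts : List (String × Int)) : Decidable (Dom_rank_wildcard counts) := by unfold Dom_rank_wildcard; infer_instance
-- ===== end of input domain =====

-- B replaces A's sort-then-branch-on-adjacent-equality with a bucket dispatch: each player's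
-- label is computed from (#players strictly above him, #players tied with him) and players are
-- emitted bucket by bucket; objective: alternative decomposition, same cost.


-- ===== PORT A =====
def pvPLAYERS : List String := ["Arnav", "Sibi", "Nikhil"]
def rank_wildcard (counts : List (String × Int)) : List (String × String) :=
  let d := PySem.Dict.ofList counts
  let sorted_players := PySem.List.sorted pvPLAYERS (fun p => PySem.Dict.getD d p 0) true
  let vals := sorted_players.map (fun p => PySem.Dict.getD d p 0)
  match sorted_players, vals with
  | [p0, p1, p2], [v0, v1, v2] =>
    if v0 = v1 ∧ v1 = v2 then
      (pvPLAYERS.foldl (fun (r : PySem.Dict String String) p => r.insert p "tied_first") PySem.Dict.empty).items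
    else if v0 = v1 ∧ v1 ≠ v2 then
      ((([p0, p1].foldl (fun (r : PySem.Dict String String) p => r.insert p "tied_first") PySem.Dict.empty)).insert p2 "third").items
    else if v1 = v2 ∧ v0 ≠ v1 then
      ([p1, p2].foldl (fun (r : PySem.Dict String String) p => r.insert p "tied_second") ((PySem.Dict.empty).insert p0 "first")).items
    else
      ((((PySem.Dict.empty).insert p0 "first").insert p1 "second").insert p2 "third").items
  | _, _ => []
-- ===== PORT B =====
def pvLabel (g : Int) (t : Int) : String :=
  if g = 0 then (if 2 ≤ t then "tied_first" else "first")
  else if g = 1 then (if t = 2 then "tied_second" else "second")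
  else "third"
def rank_wildcard_alt (counts : List (String × Int)) : List (String × String) :=
  let d := PySem.Dict.ofList counts
  let val := pvPLAYERS.foldl (fun (m : PySem.Dict String Int) p => m.insert p (PySem.Dict.getD d p 0)) PySem.Dict.empty
  let out := (PySem.List.pyRange 0 3 1).foldl (fun (out : PySem.Dict String String) g =>
    pvPLAYERS.foldl (fun (out : PySem.Dict String String) p =>
      let above := (pvPLAYERS.map (fun q => if PySem.Dict.getD val p 0 < PySem.Dict.getD val q 0 then (1 : Int) else 0)).sum
      if above = g then
        let tied := (pvPLAYERS.map (fun q => if PySem.Dict.getD val q 0 = PySem.Dict.getD val p 0 then (1 : Int) else 0)).sum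
        out.insert p (pvLabel g tied)
      else out) out) PySem.Dict.empty
  out.items

-- ===== PRECONDITION & SPEC =====
def Spec_rank_wildcard (counts : List (String × Int)) (out : List (String × String)) : Prop := out = rank_wildcard_alt counts
instance (counts : List (String × Int)) (out : List (String × String)) : Decidable (Spec_rank_wildcard counts out) := by unfold Spec_rank_wildcard; infer_instance

-- ===== CLAIM (what is proved, stated in full; the proofs are below) =====
def Claim_equal_rank_wildcard : Prop := ∀ (counts : List (String × Int)), Dom_rank_wildcard counts → Spec_rank_wildcard counts (rank_wildcard counts)

-- ===== LEMMAS AND PROOFS =====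
def pvRange3 : PySem.List.pyRange 0 3 1 = [0, 1, 2] := by decide

set_option maxHeartbeats 1000000 in
theorem pv_main (counts : List (String × Int)) : rank_wildcard counts = rank_wildcard_alt counts := by
  simp only [rank_wildcard, rank_wildcard_alt]
  generalize PySem.Dict.ofList counts = d
  rcases lt_trichotomy (PySem.Dict.getD d "Arnav" 0) (PySem.Dict.getD d "Sibi" 0) with h1 | h1 | h1
  · rcases lt_trichotomy (PySem.Dict.getD d "Sibi" 0) (PySem.Dict.getD d "Nikhil" 0) with h2 | h2 | h2
    · have h3 := lt_trans h1 h2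
      simp [pvRange3, pvPLAYERS, PySem.List.sorted, PySem.List.insertBy, List.foldl, List.map, pvLabel, PySem.Dict.getD_insert, PySem.Dict.getD_empty, List.sum_cons, List.sum_nil, h1, lt_asymm (h1), ne_of_lt (h1), (ne_of_lt (h1)).symm, h2, lt_asymm (h2), ne_of_lt (h2), (ne_of_lt (h2)).symm, h3, lt_asymm (h3), ne_of_lt (h3), (ne_of_lt (h3)).symm]
    · simp [pvRange3, pvPLAYERS, PySem.List.sorted, PySem.List.insertBy, List.foldl, List.map, pvLabel, PySem.Dict.getD_insert, PySem.Dict.getD_empty, List.sum_cons, List.sum_nil, h2, h1, lt_asymm (h1), ne_of_lt (h1), (ne_of_lt (h1)).symm, h2 ▸ h1, lt_asymm (h2 ▸ h1), ne_of_lt (h2 ▸ h1), (ne_of_lt (h2 ▸ h1)).symm]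
    · rcases lt_trichotomy (PySem.Dict.getD d "Arnav" 0) (PySem.Dict.getD d "Nikhil" 0) with h3 | h3 | h3
      simp [pvRange3, pvPLAYERS, PySem.List.sorted, PySem.List.insertBy, List.foldl, List.map, pvLabel, PySem.Dict.getD_insert, PySem.Dict.getD_empty, List.sum_cons, List.sum_nil, h1, lt_asymm (h1), ne_of_lt (h1), (ne_of_lt (h1)).symm, h2, lt_asymm (h2), ne_of_lt (h2), (ne_of_lt (h2)).symm, h3, lt_asymm (h3), ne_of_lt (h3), (ne_of_lt (h3)).symm]
      · simp [pvRange3, pvPLAYERS, PySem.List.sorted, PySem.List.insertBy, List.foldl, List.map, pvLabel, PySem.Dict.getD_insert, PySem.Dict.getD_empty, List.sum_cons, List.sum_nil, h3, h1, lt_asymm (h1), ne_of_lt (h1), (ne_of_lt (h1)).symm, h2, lt_asymm (h2), ne_of_lt (h2), (ne_of_lt (h2)).symm, h3 ▸ h1, lt_asymm (h3 ▸ h1), ne_of_lt (h3 ▸ h1), (ne_of_lt (h3 ▸ h1)).symm]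
      simp [pvRange3, pvPLAYERS, PySem.List.sorted, PySem.List.insertBy, List.foldl, List.map, pvLabel, PySem.Dict.getD_insert, PySem.Dict.getD_empty, List.sum_cons, List.sum_nil, h1, lt_asymm (h1), ne_of_lt (h1), (ne_of_lt (h1)).symm, h2, lt_asymm (h2), ne_of_lt (h2), (ne_of_lt (h2)).symm, h3, lt_asymm (h3), ne_of_lt (h3), (ne_of_lt (h3)).symm]
  · rcases lt_trichotomy (PySem.Dict.getD d "Arnav" 0) (PySem.Dict.getD d "Nikhil" 0) with h3 | h3 | h3
    · simp [pvRange3, pvPLAYERS, PySem.List.sorted, PySem.List.insertBy, List.foldl, List.map, pvLabel, PySem.Dict.getD_insert, PySem.Dict.getD_empty, List.sum_cons, List.sum_nil, h1, h3, lt_asymm (h3), ne_of_lt (h3), (ne_of_lt (h3)).symm, h1 ▸ h3, lt_asymm (h1 ▸ h3), ne_of_lt (h1 ▸ h3), (ne_of_lt (h1 ▸ h3)).symm]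
    · simp [pvRange3, pvPLAYERS, PySem.List.sorted, PySem.List.insertBy, List.foldl, List.map, pvLabel, PySem.Dict.getD_insert, PySem.Dict.getD_empty, List.sum_cons, List.sum_nil, h1, h1 ▸ h3]
    · simp [pvRange3, pvPLAYERS, PySem.List.sorted, PySem.List.insertBy, List.foldl, List.map, pvLabel, PySem.Dict.getD_insert, PySem.Dict.getD_empty, List.sum_cons, List.sum_nil, h1, h3, lt_asymm (h3), ne_of_lt (h3), (ne_of_lt (h3)).symm, h1 ▸ h3, lt_asymm (h1 ▸ h3), ne_of_lt (h1 ▸ h3), (ne_of_lt (h1 ▸ h3)).symm]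
  · rcases lt_trichotomy (PySem.Dict.getD d "Sibi" 0) (PySem.Dict.getD d "Nikhil" 0) with h2 | h2 | h2
    · rcases lt_trichotomy (PySem.Dict.getD d "Arnav" 0) (PySem.Dict.getD d "Nikhil" 0) with h3 | h3 | h3
      simp [pvRange3, pvPLAYERS, PySem.List.sorted, PySem.List.insertBy, List.foldl, List.map, pvLabel, PySem.Dict.getD_insert, PySem.Dict.getD_empty, List.sum_cons, List.sum_nil, h1, lt_asymm (h1), ne_of_lt (h1), (ne_of_lt (h1)).symm, h2, lt_asymm (h2), ne_of_lt (h2), (ne_of_lt (h2)).symm, h3, lt_asymm (h3), ne_of_lt (h3), (ne_of_lt (h3)).symm]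
      · simp [pvRange3, pvPLAYERS, PySem.List.sorted, PySem.List.insertBy, List.foldl, List.map, pvLabel, PySem.Dict.getD_insert, PySem.Dict.getD_empty, List.sum_cons, List.sum_nil, h3, h1, lt_asymm (h1), ne_of_lt (h1), (ne_of_lt (h1)).symm, h2, lt_asymm (h2), ne_of_lt (h2), (ne_of_lt (h2)).symm, h3 ▸ h1, lt_asymm (h3 ▸ h1), ne_of_lt (h3 ▸ h1), (ne_of_lt (h3 ▸ h1)).symm]
      simp [pvRange3, pvPLAYERS, PySem.List.sorted, PySem.List.insertBy, List.foldl, List.map, pvLabel, PySem.Dict.getD_insert, PySem.Dict.getD_empty, List.sum_cons, List.sum_nil, h1, lt_asymm (h1), ne_of_lt (h1), (ne_of_lt (h1)).symm, h2, lt_asymm (h2), ne_of_lt (h2), (ne_of_lt (h2)).symm, h3, lt_asymm (h3), ne_of_lt (h3), (ne_of_lt (h3)).symm]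
    · simp [pvRange3, pvPLAYERS, PySem.List.sorted, PySem.List.insertBy, List.foldl, List.map, pvLabel, PySem.Dict.getD_insert, PySem.Dict.getD_empty, List.sum_cons, List.sum_nil, h2, h1, lt_asymm (h1), ne_of_lt (h1), (ne_of_lt (h1)).symm, h2 ▸ h1, lt_asymm (h2 ▸ h1), ne_of_lt (h2 ▸ h1), (ne_of_lt (h2 ▸ h1)).symm]
    · have h3 := lt_trans h2 h1
      simp [pvRange3, pvPLAYERS, PySem.List.sorted, PySem.List.insertBy, List.foldl, List.map, pvLabel, PySem.Dict.getD_insert, PySem.Dict.getD_empty, List.sum_cons, List.sum_nil, h1, lt_asymm (h1), ne_of_lt (h1), (ne_of_lt (h1)).symm, h2, lt_asymm (h2), ne_of_lt (h2), (ne_of_lt (h2)).symm, h3, lt_asymm (h3), ne_of_lt (h3), (ne_of_lt (h3)).symm]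

-- ===== VERDICT (by name: the statement is the Claim_ definition above) =====
theorem rank_wildcard_spec : Claim_equal_rank_wildcard := by
  intro counts _
  exact pv_main counts
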